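-- pv_equiv track=rewrite | github.com/manishchenko/repo-tasks | test_3.py | find_in_different_registers
-- ===== SOURCE A (Python) =====
-- def find_in_different_registers(words):
--     uniq_words = []
--     iterator_words = iter(words)
--
--     for it_word in iterator_words:
--         if words.count(it_word) > 1:
--             words = [word for word in words if word.lower() != it_word.lower()]
--
--     for word in words:
--         if word.lower() not in uniq_words:
--             uniq_words.append(word.lower())
--
--     return uniq_words
-- ===== SOURCE B (Python) =====
-- def find_in_different_registers(words):
--     # One pass flags lowercase keys that contain a repeated exact spelling,
--     # then one dedupe pass keeps the surviving keys in first-occurrence order.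
--     seen = set()
--     bad = set()
--     for w in words:
--         if w in seen:
--             bad.add(w.lower())
--         else:
--             seen.add(w)
--     result = []
--     for w in words:
--         lw = w.lower()
--         if lw not in bad and lw not in result:
--             result.append(lw)
--     return result
-- ===== Notes on version B (the rewrite author's own statement) =====
-- stated objective: faster
-- what changed: Instead of repeatedly scanning with list.count and rebuilding the whole list inside the loop, B makes one pass that flags lowercase keys containing a repeated exact spelling in a set, then one dedupe pass that emits each unflagged lowercase key at its first occurrence.
import Mathlib
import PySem

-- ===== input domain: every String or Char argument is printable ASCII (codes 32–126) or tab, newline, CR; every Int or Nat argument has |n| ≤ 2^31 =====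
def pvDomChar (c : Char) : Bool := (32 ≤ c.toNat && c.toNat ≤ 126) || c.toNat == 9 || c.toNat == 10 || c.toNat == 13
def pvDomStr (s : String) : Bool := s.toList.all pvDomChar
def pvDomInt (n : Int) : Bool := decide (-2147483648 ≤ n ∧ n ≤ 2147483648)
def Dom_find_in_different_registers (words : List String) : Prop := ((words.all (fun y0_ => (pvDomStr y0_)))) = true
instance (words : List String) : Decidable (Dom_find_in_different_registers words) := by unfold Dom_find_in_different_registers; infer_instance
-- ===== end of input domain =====

-- B replaces A's repeated .count scans and list rebuilding by one pass that flags
-- lowercase keys containing a repeated exact spelling plus one dedupe pass (objective: faster).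
-- A only rebinds its parameter, so neither program mutates the caller's list.

-- ===== PORT A =====
def find_in_different_registers (words : List String) : List String :=
  let ws := words.foldl (fun ws it_word =>
    if PySem.List.count ws it_word > 1 then
      ws.filter (fun word => decide (PySem.Str.lower word ≠ PySem.Str.lower it_word))
    else ws) words
  ws.foldl (fun uniq word =>
    if PySem.Str.lower word ∈ uniq then uniq else uniq ++ [PySem.Str.lower word]) []

-- ===== PORT B =====
def find_in_different_registers_alt (words : List String) : List String :=
  let sb : PySem.Set String × PySem.Set String :=
    words.foldl (fun sb w =>
      if w ∈ sb.1 then (sb.1, PySem.Set.add sb.2 (PySem.Str.lower w))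
      else (PySem.Set.add sb.1 w, sb.2)) (PySem.Set.empty, PySem.Set.empty)
  words.foldl (fun result w =>
    if PySem.Str.lower w ∉ sb.2 ∧ PySem.Str.lower w ∉ result then result ++ [PySem.Str.lower w]
    else result) []

-- ===== PRECONDITION & SPEC =====
def Spec_find_in_different_registers (words : List String) (out : List String) : Prop := out = find_in_different_registers_alt words
instance (words : List String) (out : List String) : Decidable (Spec_find_in_different_registers words out) := by unfold Spec_find_in_different_registers; infer_instance

-- ===== CLAIM (what is proved, stated in full; the proofs are below) =====
def Claim_equal_find_in_different_registers : Prop := ∀ (words : List String), Dom_find_in_different_registers words → Spec_find_in_different_registers words (find_in_different_registers words)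

-- ===== LEMMAS AND PROOFS =====

-- a word survives A's first loop iff every word with its lowercase key occurs once in the original list
def pvKeep (W p : List String) (w : String) : Bool :=
  decide (∀ s ∈ p, PySem.Str.lower s = PySem.Str.lower w → List.count s W ≤ 1)

lemma pvKeep_append_singleton (W p : List String) (it w : String) :
    pvKeep W (p ++ [it]) w = true ↔
      (pvKeep W p w = true ∧ (PySem.Str.lower it = PySem.Str.lower w → List.count it W ≤ 1)) := by
  simp only [pvKeep, decide_eq_true_eq, List.mem_append, List.mem_singleton]
  exact ⟨fun h => ⟨fun s hs => h s (Or.inl hs) , h it (Or.inr rfl)⟩,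
    fun h s hs => hs.elim (fun hp => h.1 s hp) (fun he => he ▸ h.2)⟩

lemma loopA (W : List String) (rest : List String) (p : List String) (hsub : ∀ x ∈ rest, x ∈ W) :
    rest.foldl (fun ws it => if PySem.List.count ws it > 1 then
        ws.filter (fun w => decide (PySem.Str.lower w ≠ PySem.Str.lower it)) else ws)
      (W.filter (pvKeep W p))
    = W.filter (pvKeep W (p ++ rest)) := by
  induction rest generalizing p with
  | nil => simp
  | cons it rest ih =>
    have hsub' : ∀ x ∈ rest, x ∈ W := fun x hx => hsub x (by simp [hx])
    have hstep : (if PySem.List.count (W.filter (pvKeep W p)) it > 1 then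
        (W.filter (pvKeep W p)).filter (fun w => decide (PySem.Str.lower w ≠ PySem.Str.lower it))
        else (W.filter (pvKeep W p))) = W.filter (pvKeep W (p ++ [it])) := by
      simp only [PySem.List.count, gt_iff_lt]
      by_cases hk : pvKeep W p it = true
      · have hcnt : List.count it (W.filter (pvKeep W p)) = List.count it W :=
          List.count_filter hk
        by_cases hc : 1 < List.count it W
        · rw [if_pos (by rw [hcnt]; exact hc), List.filter_filter]
          refine List.filter_congr ?_
          intro w hw
          rw [Bool.eq_iff_iff, Bool.and_eq_true, decide_eq_true_eq, pvKeep_append_singleton]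
          constructor
          · rintro ⟨h1, h2⟩
            exact ⟨h2, fun he => absurd he.symm h1⟩
          · rintro ⟨h1, h2⟩
            refine ⟨fun he => absurd (h2 he.symm) (by omega), h1⟩
        · rw [if_neg (by rw [hcnt]; omega)]
          refine List.filter_congr ?_
          intro w hw
          rw [Bool.eq_iff_iff, pvKeep_append_singleton]
          exact ⟨fun h => ⟨h, fun _ => Nat.le_of_not_lt hc⟩, fun h => h.1⟩
      · have hk' : ∃ s ∈ p, PySem.Str.lower s = PySem.Str.lower it ∧ 1 < List.count s W := by
          simpa [pvKeep] using hk
        have hcnt : List.count it (W.filter (pvKeep W p)) = 0 := by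
          rw [List.count_eq_zero]
          intro hmem
          exact hk (List.of_mem_filter hmem)
        rw [if_neg (by omega)]
        refine List.filter_congr ?_
        intro w hw
        rw [Bool.eq_iff_iff, pvKeep_append_singleton]
        refine ⟨fun h => ⟨h, ?_⟩, fun h => h.1⟩
        intro he
        obtain ⟨s, hs, hls, hcs⟩ := hk'
        rw [pvKeep, decide_eq_true_eq] at h
        exact absurd (h s hs (by rw [hls, he])) (by omega)
    rw [List.foldl_cons, hstep, ih (p ++ [it]) hsub', List.append_assoc]
    rfl

-- B's first loop: the bad set holds exactly the lowercase keys of exactly-repeated spellings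
lemma loopB (rest p : List String) (seen bad : PySem.Set String)
    (hseen : ∀ x, x ∈ seen ↔ x ∈ p)
    (hbad : ∀ k, k ∈ bad ↔ ∃ s ∈ p, PySem.Str.lower s = k ∧ 1 < List.count s p) :
    ∀ k, k ∈ (rest.foldl (fun sb w =>
        if w ∈ sb.1 then (sb.1, PySem.Set.add sb.2 (PySem.Str.lower w))
        else (PySem.Set.add sb.1 w, sb.2)) (seen, bad)).2
      ↔ ∃ s ∈ p ++ rest, PySem.Str.lower s = k ∧ 1 < List.count s (p ++ rest) := by
  induction rest generalizing p seen bad with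
  | nil => simpa using hbad
  | cons w rest ih =>
    rw [List.foldl_cons, show p ++ w :: rest = (p ++ [w]) ++ rest by simp]
    by_cases hw : w ∈ seen
    · have hwp : w ∈ p := (hseen w).mp hw
      rw [if_pos hw]
      refine ih (p ++ [w]) seen (PySem.Set.add bad (PySem.Str.lower w)) ?_ ?_
      · intro x
        rw [hseen x]
        constructor
        · intro h; exact List.mem_append_left _ h
        · intro h
          rcases List.mem_append.mp h with h | h
          · exact h
          · simp at h; subst h; exact hwp
      · intro k
        rw [PySem.Set.mem_add, hbad k]
        constructor
        · rintro (⟨s, hs, hls, hc⟩ | rfl)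
          · exact ⟨s, List.mem_append_left _ hs, hls,
              by rw [List.count_append]; omega⟩
          · refine ⟨w, List.mem_append_right _ (by simp), rfl, ?_⟩
            have : 0 < List.count w p := List.count_pos_iff.mpr hwp
            rw [List.count_append]
            simp
            omega
        · rintro ⟨s, hs, hls, hc⟩
          by_cases hsw : s = w
          · right; rw [← hls, hsw]
          · left
            refine ⟨s, ?_, hls, ?_⟩
            · rcases List.mem_append.mp hs with h | h
              · exact h
              · simp at h; exact absurd h hsw
            · rw [List.count_append] at hc
              have : List.count s [w] = 0 := by
                rw [List.count_eq_zero]; simp [hsw]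
              omega
    · have hwp : w ∉ p := fun h => hw ((hseen w).mpr h)
      rw [if_neg hw]
      refine ih (p ++ [w]) (PySem.Set.add seen w) bad ?_ ?_
      · intro x
        rw [PySem.Set.mem_add, hseen x]
        simp
      · intro k
        rw [hbad k]
        constructor
        · rintro ⟨s, hs, hls, hc⟩
          exact ⟨s, List.mem_append_left _ hs, hls, by rw [List.count_append]; omega⟩
        · rintro ⟨s, hs, hls, hc⟩
          by_cases hsw : s = w
          · subst hsw
            have h0 : List.count s p = 0 := List.count_eq_zero.mpr hwp
            rw [List.count_append] at hc
            simp [h0] at hc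
          · refine ⟨s, ?_, hls, ?_⟩
            · rcases List.mem_append.mp hs with h | h
              · exact h
              · simp at h; exact absurd h hsw
            · rw [List.count_append] at hc
              have : List.count s [w] = 0 := by rw [List.count_eq_zero]; simp [hsw]
              omega

-- A's dedupe pass over the filtered list equals B's guarded dedupe pass over the original list
lemma pass2 (W : List String) (bad : PySem.Set String)
    (hbad : ∀ w : String, pvKeep W W w = true ↔ PySem.Str.lower w ∉ bad) :
    ∀ (rest acc : List String),
    (rest.filter (pvKeep W W)).foldl (fun uniq w =>
        if PySem.Str.lower w ∈ uniq then uniq else uniq ++ [PySem.Str.lower w]) acc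
    = rest.foldl (fun acc w =>
        if PySem.Str.lower w ∉ bad ∧ PySem.Str.lower w ∉ acc then acc ++ [PySem.Str.lower w]
        else acc) acc := by
  intro rest
  induction rest with
  | nil => intro acc; rfl
  | cons w rest ih =>
    intro acc
    by_cases hk : pvKeep W W w = true
    · have hnb : PySem.Str.lower w ∉ bad := (hbad w).mp hk
      rw [List.filter_cons_of_pos hk, List.foldl_cons, List.foldl_cons]
      by_cases hm : PySem.Str.lower w ∈ acc
      · rw [if_pos hm, if_neg (by simp [hm]), ih acc]
      · rw [if_neg hm, if_pos ⟨hnb, hm⟩, ih _]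
    · have hb : PySem.Str.lower w ∈ bad := by
        by_contra h
        exact hk ((hbad w).mpr h)
      rw [List.filter_cons_of_neg (by simp [hk]), List.foldl_cons,
        if_neg (by simp [hb]), ih acc]

lemma keep_iff_not_bad (W : List String) (bad : PySem.Set String)
    (hbad : ∀ k, k ∈ bad ↔ ∃ s ∈ W, PySem.Str.lower s = k ∧ 1 < List.count s W) :
    ∀ w : String, pvKeep W W w = true ↔ PySem.Str.lower w ∉ bad := by
  intro w
  rw [hbad]
  simp only [pvKeep, decide_eq_true_eq]
  constructor
  · rintro h ⟨s, hs, hls, hc⟩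
    exact absurd (h s hs hls) (by omega)
  · intro h s hs hls
    by_contra hgt
    exact h ⟨s, hs, hls, by omega⟩

-- ===== VERDICT (by name: the statement is the Claim_ definition above) =====
theorem find_in_different_registers_spec : Claim_equal_find_in_different_registers := by
  intro words _
  unfold Spec_find_in_different_registers find_in_different_registers find_in_different_registers_alt
  simp only []
  have hA : words.foldl (fun ws it => if PySem.List.count ws it > 1 then
      ws.filter (fun w => decide (PySem.Str.lower w ≠ PySem.Str.lower it)) else ws) words
      = words.filter (pvKeep words words) := by
    have h0 : words.filter (pvKeep words []) = words := by
      rw [List.filter_eq_self.mpr]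
      intro w _
      simp [pvKeep]
    rw [← h0]
    have := loopA words words [] (fun x hx => hx)
    rw [h0] at this ⊢
    simpa using this
  set sb := words.foldl (fun sb w =>
      if w ∈ sb.1 then (sb.1, PySem.Set.add sb.2 (PySem.Str.lower w))
      else (PySem.Set.add sb.1 w, sb.2)) (PySem.Set.empty, PySem.Set.empty) with hsb
  have hbad : ∀ k, k ∈ sb.2 ↔ ∃ s ∈ words, PySem.Str.lower s = k ∧ 1 < List.count s words := by
    have := loopB words [] PySem.Set.empty PySem.Set.empty
      (by intro x; simp [PySem.Set.empty]) (by intro k; simp [PySem.Set.empty])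
    simpa using this
  rw [hA]
  exact pass2 words sb.2 (keep_iff_not_bad words sb.2 hbad) words []
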